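-- pv_equiv track=rewrite | github.com/JacobHanimann/IsoAligner | Streamlit_app/Statistics.py | isoform_form_check_stats
-- ===== SOURCE A (Python) =====
-- def isoform_form_check_stats(isoform_check_list):
--     correct_aa = 0
--     false_aa = 0
--     mismatch_aa =0
--     for type in isoform_check_list:
--         if type == 'gap':
--             continue
--         if type == 'correct':
--             correct_aa += 1
--         if type == 'wrong':
--             false_aa += 1
--         if type =='mismatch':
--             mismatch_aa +=1
--     return correct_aa, false_aa,mismatch_aa
-- ===== SOURCE B (Python) =====
-- def isoform_form_check_stats(isoform_check_list):
--     return (isoform_check_list.count('correct'),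
--             isoform_check_list.count('wrong'),
--             isoform_check_list.count('mismatch'))
-- ===== Notes on version B (the rewrite author's own statement) =====
-- stated objective: idiomatic
-- what changed: Replaced the single accumulating loop with three independent list.count passes, one per label.
import Mathlib
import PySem

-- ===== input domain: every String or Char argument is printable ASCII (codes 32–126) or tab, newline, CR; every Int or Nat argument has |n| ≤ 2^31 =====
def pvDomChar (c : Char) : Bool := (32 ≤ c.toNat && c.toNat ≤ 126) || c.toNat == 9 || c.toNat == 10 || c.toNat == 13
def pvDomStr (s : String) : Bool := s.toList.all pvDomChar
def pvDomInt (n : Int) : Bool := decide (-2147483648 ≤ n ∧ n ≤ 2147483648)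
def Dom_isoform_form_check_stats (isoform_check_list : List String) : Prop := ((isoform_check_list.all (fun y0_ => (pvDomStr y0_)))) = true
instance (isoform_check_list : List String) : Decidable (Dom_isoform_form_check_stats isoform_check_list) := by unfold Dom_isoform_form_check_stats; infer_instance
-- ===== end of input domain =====

-- B replaces the single accumulating loop with three independent count passes (idiomatic).
-- ===== PORT A =====
-- loop body of A: the three successive `if` updates on (correct_aa, false_aa, mismatch_aa)
def pvStepA (acc : Int × Int × Int) (t : String) : Int × Int × Int :=
  if t == "gap" then acc
  else
    let acc := if t == "correct" then (acc.1 + 1, acc.2.1, acc.2.2) else acc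
    let acc := if t == "wrong" then (acc.1, acc.2.1 + 1, acc.2.2) else acc
    if t == "mismatch" then (acc.1, acc.2.1, acc.2.2 + 1) else acc

def isoform_form_check_stats (isoform_check_list : List String) : Int × Int × Int :=
  isoform_check_list.foldl pvStepA (0, 0, 0)

-- ===== PORT B =====
def isoform_form_check_stats_alt (isoform_check_list : List String) : Int × Int × Int :=
  ((PySem.List.count isoform_check_list "correct" : Int),
   (PySem.List.count isoform_check_list "wrong" : Int),
   (PySem.List.count isoform_check_list "mismatch" : Int))

-- ===== PRECONDITION & SPEC =====
def Spec_isoform_form_check_stats (isoform_check_list : List String) (out : Int × Int × Int) : Prop := out = isoform_form_check_stats_alt isoform_check_list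
instance (isoform_check_list : List String) (out : Int × Int × Int) : Decidable (Spec_isoform_form_check_stats isoform_check_list out) := by unfold Spec_isoform_form_check_stats; infer_instance

-- ===== CLAIM (what is proved, stated in full; the proofs are below) =====
def Claim_equal_isoform_form_check_stats : Prop := ∀ (isoform_check_list : List String), Dom_isoform_form_check_stats isoform_check_list → Spec_isoform_form_check_stats isoform_check_list (isoform_form_check_stats isoform_check_list)

-- ===== LEMMAS AND PROOFS =====

-- ===== VERDICT (by name: the statement is the Claim_ definition above) =====
theorem fold_eq_counts (l : List String) (a b c : Int) :
    l.foldl pvStepA (a, b, c)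
    = (a + l.count "correct", b + l.count "wrong", c + l.count "mismatch") := by
  induction l generalizing a b c with
  | nil => simp
  | cons x xs ih =>
    simp only [List.foldl_cons, List.count_cons]
    by_cases hg : x = "gap"
    · subst hg; simp [pvStepA, ih]
    · by_cases hc : x = "correct" <;> by_cases hw : x = "wrong" <;> by_cases hm : x = "mismatch" <;>
        simp_all [pvStepA, ih] <;> ring_nf

theorem isoform_form_check_stats_spec : Claim_equal_isoform_form_check_stats := by
  intro l _
  unfold Spec_isoform_form_check_stats isoform_form_check_stats isoform_form_check_stats_alt
  rw [fold_eq_counts]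
  simp [PySem.List.count_eq]
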